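-- pv_equiv track=rewrite | github.com/BradMcDanel/term-quantization | tr_layer.py | hese
-- ===== SOURCE A (Python) =====
-- def hese(number):
--     '''
--     Applies HESE encoding on a number.
--     Returns the power-of-two exponents in the encoding.
--     '''
--     char_number = bin(number).split('b')[1]
--     if bin(number)[0] == '-':
--         sign = -1
--     else:
--         sign = 1
--     char_number = '0' + char_number + '0'
--     char_number = char_number[::-1]
--     exponents = []
--     for i in range(len(char_number) - 1):
--         b1 = char_number[i]
--         b2 = char_number[i+1]
--         if b1 == b2:
--             continue
--         if b1 == '0':
--             exponents.append(-sign*2**i)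
--         else:
--             exponents.append(sign*2**i)
--
--     # merging neighbors hack
--     keep_exponents = []
--     for i in range(0, len(exponents), 2):
--         if exponents[i+1] == -(2*exponents[i]):
--             keep_exponents.append(-exponents[i])
--         else:
--             keep_exponents.append(exponents[i])
--             keep_exponents.append(exponents[i+1])
--
--     return keep_exponents
-- ===== SOURCE B (Python) =====
-- def hese(number):
--     '''
--     Applies HESE encoding on a number.
--     Returns the power-of-two exponents in the encoding.
--     '''
--     char_number = bin(number).split('b')[1]
--     sign = -1 if bin(number)[0] == '-' else 1
--     bits = char_number[::-1] + '0'
--     out = []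
--     start = None
--     for i, b in enumerate(bits):
--         if b == '1':
--             if start is None:
--                 start = i
--         else:
--             if start is not None:
--                 if start == i - 1:
--                     out.append(sign * 2**start)
--                 else:
--                     out.append(-sign * 2**start)
--                     out.append(sign * 2**i)
--                 start = None
--     return out
-- ===== Notes on version B (the rewrite author's own statement) =====
-- stated objective: simpler
-- what changed: Replaced A's two-phase pipeline (emit all bit-transition exponents, then a second merge pass over pairs) by a single LSB-to-MSB pass that tracks the start index of the current run of set bits and emits each run's digits directly.
import Mathlib
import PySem

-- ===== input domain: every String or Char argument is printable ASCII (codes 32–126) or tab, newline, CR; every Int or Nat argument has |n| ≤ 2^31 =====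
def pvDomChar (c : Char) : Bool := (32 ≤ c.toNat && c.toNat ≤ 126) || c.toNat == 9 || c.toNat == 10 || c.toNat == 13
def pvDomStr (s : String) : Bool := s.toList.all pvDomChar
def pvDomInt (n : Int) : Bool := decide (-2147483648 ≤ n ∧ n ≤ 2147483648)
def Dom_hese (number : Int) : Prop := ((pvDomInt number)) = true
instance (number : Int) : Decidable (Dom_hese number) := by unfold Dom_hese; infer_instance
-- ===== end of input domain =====

-- B replaces A's transition-list + pair-merge second pass by one run-tracking pass over the
-- same reversed bit string; same return value on every int (the equivalence proved below).

-- ===== PORT A =====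

-- bin(n).split('b')[1]: the binary digits of |n|, MSB first ('0' for 0); used by both pythons
def natToBinAux : Nat → List Char
  | 0 => []
  | n + 1 => natToBinAux ((n + 1) / 2) ++ [if (n + 1) % 2 = 1 then '1' else '0']

def natToBin (n : Nat) : List Char := if n = 0 then ['0'] else natToBinAux n

-- A's first loop: for i in range(len-1): compare char_number[i], char_number[i+1]
def transLoop (s : Int) : List Char → Nat → List Int
  | c1 :: c2 :: rest, i =>
    (if c1 = c2 then [] else if c1 = '0' then [(-s) * 2 ^ i] else [s * 2 ^ i])
      ++ transLoop s (c2 :: rest) (i + 1)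
  | _, _ => []

-- A's second loop over pairs (exponents[i], exponents[i+1]); the list it is run on always
-- has even length (transitions come in pairs), so the singleton case is unreachable
-- (Python would raise IndexError there)
def mergeLoop : List Int → List Int
  | a :: b :: t => if b = -(2 * a) then (-a) :: mergeLoop t else a :: b :: mergeLoop t
  | l => l

def hese (number : Int) : List Int :=
  let charNumber := natToBin number.natAbs
  let sign : Int := if number < 0 then -1 else 1   -- bin(number)[0] == '-'
  let padded := '0' :: charNumber ++ ['0']
  let revd := padded.reverse
  mergeLoop (transLoop sign revd 0)

-- ===== PORT B =====

-- Source B's single pass: `start` is the index of the first 1-bit of the current run (None if none)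
def scanLoop (s : Int) : Option Nat → List Char → Nat → List Int
  | _, [], _ => []
  | st, b :: rest, i =>
    if b = '1' then
      scanLoop s (match st with | none => some i | some a => some a) rest (i + 1)
    else
      match st with
      | none => scanLoop s none rest (i + 1)
      | some a =>
        (if a = i - 1 then [s * 2 ^ a] else [(-s) * 2 ^ a, s * 2 ^ i])
          ++ scanLoop s none rest (i + 1)

def hese_alt (number : Int) : List Int :=
  let charNumber := natToBin number.natAbs
  let sign : Int := if number < 0 then -1 else 1
  let bits := charNumber.reverse ++ ['0']
  scanLoop sign none bits 0

-- ===== PRECONDITION & SPEC =====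
def Spec_hese (number : Int) (out : List Int) : Prop := out = hese_alt number
instance (number : Int) (out : List Int) : Decidable (Spec_hese number out) := by unfold Spec_hese; infer_instance

-- ===== CLAIM (what is proved, stated in full; the proofs are below) =====
def Claim_equal_hese : Prop := ∀ (number : Int), Dom_hese number → Spec_hese number (hese number)

-- ===== LEMMAS AND PROOFS =====

lemma chars_natToBinAux : ∀ n, ∀ c ∈ natToBinAux n, c = '0' ∨ c = '1' := by
  intro n
  induction n using Nat.strong_induction_on with
  | _ n ih =>
    match n with
    | 0 => simp [natToBinAux]
    | m + 1 =>
      intro c hc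
      simp only [natToBinAux, List.mem_append, List.mem_singleton] at hc
      rcases hc with h | h
      · exact ih ((m + 1) / 2) (Nat.div_lt_self (Nat.succ_pos m) (by norm_num)) c h
      · subst h; split <;> simp

lemma chars_natToBin (n : Nat) : ∀ c ∈ natToBin n, c = '0' ∨ c = '1' := by
  unfold natToBin
  split
  · simp
  · exact chars_natToBinAux n

lemma pow_eq_pow_int {i j : Nat} (h : (2 : Int) ^ i = 2 ^ j) : i = j := by
  have : (2 : Nat) ^ i = 2 ^ j := by exact_mod_cast h
  exact Nat.pow_right_injective (by norm_num) this

lemma mergeLoop_cons_cons (a b : Int) (t : List Int) :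
    mergeLoop (a :: b :: t) = if b = -(2 * a) then (-a) :: mergeLoop t else a :: b :: mergeLoop t := rfl

-- the heart: A's transition list, merged, equals B's run scan, for any bit list ending in '0'
lemma key (s : Int) (hs : s = 1 ∨ s = -1) :
    ∀ (l : List Char), (∀ c ∈ l, c = '0' ∨ c = '1') → (l = [] ∨ l.getLast? = some '0') →
      ∀ i : Nat,
        mergeLoop (transLoop s ('0' :: l) i) = scanLoop s none l i ∧
        (∀ a, a < i → l ≠ [] →
          mergeLoop ((-s) * 2 ^ a :: transLoop s ('1' :: l) i) = scanLoop s (some a) l i) := by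
  intro l
  induction l with
  | nil =>
    intro _ _ i
    refine ⟨by simp [transLoop, mergeLoop, scanLoop], fun a _ h => absurd rfl h⟩
  | cons c rest ih =>
    intro hch hend i
    have hc : c = '0' ∨ c = '1' := hch c (List.mem_cons_self ..)
    have hch' : ∀ x ∈ rest, x = '0' ∨ x = '1' := fun x hx => hch x (List.mem_cons_of_mem _ hx)
    have hend' : rest = [] ∨ rest.getLast? = some '0' := by
      rcases hend with h | h
      · exact absurd h (List.cons_ne_nil _ _)
      · cases rest with
        | nil => exact Or.inl rfl
        | cons r rs => right; rwa [List.getLast?_cons_cons] at h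
    -- if c = '1' then rest is nonempty (the list ends in '0')
    have hrest1 : c = '1' → rest ≠ [] := by
      intro h1 hnil
      rcases hend with h | h
      · exact List.cons_ne_nil _ _ h
      · subst hnil h1; simp [List.getLast?] at h
    constructor
    · -- state none / previous char '0'
      rcases hc with h0 | h1
      · subst h0
        have htail := (ih hch' hend' (i + 1)).1
        simp [transLoop, scanLoop, htail]
      · subst h1
        have hne := hrest1 rfl
        have hrun := (ih hch' hend' (i + 1)).2 i (Nat.lt_succ_self i) hne
        simpa [transLoop, scanLoop] using hrun
    · -- state some a / previous char '1'
      intro a ha _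
      rcases hc with h0 | h1
      · subst h0
        have htail := (ih hch' hend' (i + 1)).1
        have hi : 1 ≤ i := Nat.one_le_iff_ne_zero.mpr (by omega)
        have hcond : (s * 2 ^ i = -(2 * ((-s) * 2 ^ a))) ↔ (a = i - 1) := by
          constructor
          · intro h
            have h2 : s * 2 ^ i = s * 2 ^ (a + 1) := by ring_nf; ring_nf at h; linarith [h]
            have hs0 : s ≠ 0 := by rcases hs with h | h <;> simp [h]
            have h3 := mul_left_cancel₀ hs0 h2
            have := pow_eq_pow_int h3
            omega
          · intro h
            have : i = a + 1 := by omega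
            subst this; ring
        have htr : transLoop s ('1' :: '0' :: rest) i
            = s * 2 ^ i :: transLoop s ('0' :: rest) (i + 1) := by simp [transLoop]
        have hsc : scanLoop s (some a) ('0' :: rest) i
            = (if a = i - 1 then [s * 2 ^ a] else [(-s) * 2 ^ a, s * 2 ^ i])
              ++ scanLoop s none rest (i + 1) := by simp [scanLoop]
        rw [htr, hsc]
        by_cases hcase : a = i - 1
        · have hb : s * 2 ^ i = -(2 * ((-s) * 2 ^ a)) := hcond.mpr hcase
          rw [if_pos hcase, mergeLoop_cons_cons, if_pos hb, htail]
          simp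
        · have hb : ¬ (s * 2 ^ i = -(2 * ((-s) * 2 ^ a))) := fun h => hcase (hcond.mp h)
          rw [if_neg hcase, mergeLoop_cons_cons, if_neg hb, htail]
          simp
      · subst h1
        have hne := hrest1 rfl
        have hrun := (ih hch' hend' (i + 1)).2 a (Nat.lt_succ_of_lt ha) hne
        simpa [transLoop, scanLoop] using hrun

-- ===== VERDICT (by name: the statement is the Claim_ definition above) =====
theorem hese_spec : Claim_equal_hese := by
  intro number _
  show mergeLoop (transLoop (if number < 0 then (-1 : Int) else 1)
        (('0' :: natToBin number.natAbs ++ ['0']).reverse) 0)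
      = scanLoop (if number < 0 then (-1 : Int) else 1) none
        ((natToBin number.natAbs).reverse ++ ['0']) 0
  set s : Int := if number < 0 then -1 else 1 with hsdef
  set c := natToBin number.natAbs with hcdef
  have hs : s = 1 ∨ s = -1 := by by_cases h : number < 0 <;> simp [hsdef, h]
  have hrev : ('0' :: c ++ ['0']).reverse = '0' :: (c.reverse ++ ['0']) := by simp
  have hch : ∀ x ∈ c.reverse ++ ['0'], x = '0' ∨ x = '1' := by
    intro x hx
    rcases List.mem_append.mp hx with h | h
    · exact chars_natToBin _ x (List.mem_reverse.mp h)
    · simp at h; simp [h]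
  have hend : (c.reverse ++ ['0'] : List Char) = [] ∨ (c.reverse ++ ['0']).getLast? = some '0' := by
    right; simp
  rw [hrev]
  exact (key s hs (c.reverse ++ ['0']) hch hend 0).1
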